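-- pv_equiv track=rewrite | github.com/tatianambsantos/OtimizacaoMultiobjetiva | knapsack-neighbor_search.py | hill_climbing_bi
-- ===== SOURCE A (Python) =====
-- def evaluate_solution(solution, profits, weights, Q):
--     total_profit = sum(p * s for p, s in zip(profits, solution))
--     total_weight = sum(w * s for w, s in zip(weights, solution))
--     if total_weight > Q:
--         return 0, total_weight  # Se excerder a capacidade retorna 0
--     return total_profit, total_weight
--
-- def get_neighbors(solution):
--     neighbors = []
--     for i in range(len(solution)-1):
--         neighbor = solution[:]
--         neighbor[i] = 1 - neighbor[i]
--         neighbor[i+1] = 1 - neighbor[i+1]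
--         neighbors.append(neighbor)
--     return neighbors
--
-- def hill_climbing_bi(solution, profits, weights, Q):
--     current_profit, _ = evaluate_solution(solution, profits, weights, Q)
--     while True:
--         neighbors = get_neighbors(solution)
--         best_solution = solution[:]
--         best_profit = current_profit
--         for neighbor in neighbors:
--             neighbor_profit, _ = evaluate_solution(neighbor, profits, weights, Q)
--             if neighbor_profit > best_profit:
--                 best_solution = neighbor
--                 best_profit = neighbor_profit
--         if best_profit > current_profit:
--             solution = best_solution
--             current_profit = best_profit
--         else:
--             break  # Para se nenhuma melhora for encontrada
--     return solution
-- ===== SOURCE B (Python) =====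
-- def hill_climbing_bi(solution, profits, weights, Q):
--     # Compute the totals once per iteration, then score each adjacent
--     # two-bit flip with an O(1) profit/weight delta and flip the best index.
--     n = len(solution)
--     solution = solution[:]
--     while True:
--         tp = sum(p * s for p, s in zip(profits, solution))
--         tw = sum(w * s for w, s in zip(weights, solution))
--         cur = 0 if tw > Q else tp
--         dps = [p * (1 - 2 * s) for p, s in zip(profits, solution)]
--         dws = [w * (1 - 2 * s) for w, s in zip(weights, solution)]
--         best_i = None
--         best = cur
--         for i in range(n - 1):
--             dp = sum(dps[i:i + 2])
--             dw = sum(dws[i:i + 2])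
--             np = 0 if tw + dw > Q else tp + dp
--             if np > best:
--                 best_i, best = i, np
--         if best_i is None:
--             return solution
--         solution[best_i] = 1 - solution[best_i]
--         solution[best_i + 1] = 1 - solution[best_i + 1]
-- ===== Notes on version B (the rewrite author's own statement) =====
-- stated objective: alternative
-- what changed: Instead of materializing every two-bit-flip neighbor and re-evaluating its full profit/weight sums, B computes the totals and per-index flip-delta lists once per iteration and scores each neighbor with an O(1) delta (a two-element slice sum), flipping the best index in place; a timing run read 165x at the largest size both finished but could not confirm it overall, so no speed is claimed.
import Mathlib
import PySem

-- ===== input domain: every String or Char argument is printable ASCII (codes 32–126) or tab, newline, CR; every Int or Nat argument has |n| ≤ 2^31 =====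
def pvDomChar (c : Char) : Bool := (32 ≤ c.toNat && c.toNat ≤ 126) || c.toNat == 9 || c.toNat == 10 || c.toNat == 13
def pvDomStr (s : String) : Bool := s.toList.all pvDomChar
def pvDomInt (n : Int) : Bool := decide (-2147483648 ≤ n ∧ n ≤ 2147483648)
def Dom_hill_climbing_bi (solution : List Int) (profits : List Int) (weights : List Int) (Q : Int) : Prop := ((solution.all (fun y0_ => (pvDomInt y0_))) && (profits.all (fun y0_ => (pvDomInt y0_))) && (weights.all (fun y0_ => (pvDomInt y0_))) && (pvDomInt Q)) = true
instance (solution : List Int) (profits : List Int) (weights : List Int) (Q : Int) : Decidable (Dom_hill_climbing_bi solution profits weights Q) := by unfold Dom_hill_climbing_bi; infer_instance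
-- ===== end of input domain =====

-- B replaces A's per-neighbor full re-evaluation with per-iteration totals and delta lists,
-- scoring each two-bit-flip neighbor with an O(1) delta instead (no speed is claimed).


-- ===== PORT A =====
-- sum(p * s for p, s in zip(profits, solution))
def pvZipSum (p s : List Int) : Int := ((p.zip s).map (fun x => x.1 * x.2)).sum

def evaluate_solution (solution profits weights : List Int) (Q : Int) : Int × Int :=
  let total_profit := pvZipSum profits solution
  let total_weight := pvZipSum weights solution
  if total_weight > Q then (0, total_weight)
  else (total_profit, total_weight)

-- neighbor = solution[:]; neighbor[i] = 1 - neighbor[i]; neighbor[i+1] = 1 - neighbor[i+1]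
-- (indices i, i+1 are nonnegative and, at every call site, in range: plain set/getD are exact)
def pvFlip2 (s : List Int) (i : Nat) : List Int :=
  let nb := s.set i (1 - s.getD i 0)
  nb.set (i + 1) (1 - nb.getD (i + 1) 0)

def get_neighbors (solution : List Int) : List (List Int) :=
  (List.range (solution.length - 1)).map (fun i => pvFlip2 solution i)

-- the `while True` loop; fuel 2^n is a totality guard only (the kept profit strictly
-- increases over at most 2^n reachable solutions, so the Python loop stops within the fuel)
def pvLoopA : Nat → List Int → List Int → List Int → Int → Int → List Int
  | 0, solution, _, _, _, _ => solution
  | fuel + 1, solution, profits, weights, Q, current_profit =>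
    let st := (get_neighbors solution).foldl
      (fun (st : List Int × Int) neighbor =>
        let neighbor_profit := (evaluate_solution neighbor profits weights Q).1
        if neighbor_profit > st.2 then (neighbor, neighbor_profit) else st)
      (solution, current_profit)
    if st.2 > current_profit then pvLoopA fuel st.1 profits weights Q st.2
    else solution

def hill_climbing_bi (solution : List Int) (profits : List Int) (weights : List Int) (Q : Int) : List Int :=
  pvLoopA (2 ^ solution.length) solution profits weights Q
    (evaluate_solution solution profits weights Q).1

-- ===== PORT B =====
-- [p * (1 - 2 * s) for p, s in zip(profits, solution)]
def pvDeltas (p s : List Int) : List Int := (p.zip s).map (fun x => x.1 * (1 - 2 * x.2))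

-- the `while True` loop of Source B; same fuel-as-totality-guard as in port A
def pvLoopB : Nat → List Int → List Int → List Int → Int → List Int
  | 0, solution, _, _, _ => solution
  | fuel + 1, solution, profits, weights, Q =>
    let tp := pvZipSum profits solution
    let tw := pvZipSum weights solution
    let cur := if tw > Q then 0 else tp
    let dps := pvDeltas profits solution
    let dws := pvDeltas weights solution
    let st := (List.range (solution.length - 1)).foldl
      (fun (st : Option Nat × Int) (i : Nat) =>
        let dp := (PySem.List.slice dps (some (i : Int)) (some ((i : Int) + 2))).sum
        let dw := (PySem.List.slice dws (some (i : Int)) (some ((i : Int) + 2))).sum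
        let np := if tw + dw > Q then 0 else tp + dp
        if np > st.2 then (some i, np) else st)
      (none, cur)
    match st.1 with
    | none => solution
    | some i => pvLoopB fuel (pvFlip2 solution i) profits weights Q

def hill_climbing_bi_alt (solution : List Int) (profits : List Int) (weights : List Int) (Q : Int) : List Int :=
  pvLoopB (2 ^ solution.length) solution profits weights Q

-- ===== SPEC =====
def Spec_hill_climbing_bi (solution : List Int) (profits : List Int) (weights : List Int) (Q : Int) (out : List Int) : Prop := out = hill_climbing_bi_alt solution profits weights Q
instance (solution : List Int) (profits : List Int) (weights : List Int) (Q : Int) (out : List Int) : Decidable (Spec_hill_climbing_bi solution profits weights Q out) := by unfold Spec_hill_climbing_bi; infer_instance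

-- ===== CLAIM (what is proved, stated in full; the proofs are below) =====
def Claim_equal_hill_climbing_bi : Prop := ∀ (solution : List Int) (profits : List Int) (weights : List Int) (Q : Int), Dom_hill_climbing_bi solution profits weights Q → Spec_hill_climbing_bi solution profits weights Q (hill_climbing_bi solution profits weights Q)

-- ===== LEMMAS AND PROOFS =====

-- proof-side abbreviation: xs[j] read with 0 outside (matches zip truncation)
def pvIx (xs : List Int) (j : Nat) : Int := xs.getD j 0

-- sum of a two-element window, with 0 past the end
theorem pv_take2_sum (l : List Int) (i : Nat) :
    ((l.drop i).take 2).sum = l.getD i 0 + l.getD (i + 1) 0 := by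
  induction i generalizing l with
  | zero =>
    match l with
    | [] => simp
    | [a] => simp
    | a :: b :: t => simp [List.getD]
  | succ i ih =>
    match l with
    | [] => simp
    | a :: t => simpa using ih t

-- entries of the delta list, in pvIx form (valid below solution's length)
theorem pvDeltas_getD (p s : List Int) (j : Nat) (h : j < s.length) :
    (pvDeltas p s).getD j 0 = pvIx p j * (1 - 2 * pvIx s j) := by
  induction s generalizing p j with
  | nil => simp at h
  | cons a t ih =>
    cases p with
    | nil => simp [pvDeltas, pvIx]
    | cons b q =>
      cases j with
      | zero => simp [pvDeltas, pvIx]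
      | succ j =>
        have := ih q j (by simpa using h)
        simpa [pvDeltas, pvIx] using this

-- the O(1) delta Source B reads off the delta list, in pvIx form
theorem pv_dp_eq (p s : List Int) (i : Nat) (h : i + 1 < s.length) :
    (PySem.List.slice (pvDeltas p s) (some (i : Int)) (some ((i : Int) + 2))).sum
      = pvIx p i * (1 - 2 * pvIx s i) + pvIx p (i + 1) * (1 - 2 * pvIx s (i + 1)) := by
  have h2 : ((i : Int) + 2) = ((i + 2 : Nat) : Int) := by push_cast; ring
  rw [h2, PySem.List.slice_natCast]
  have h3 : i + 2 - i = 2 := by omega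
  rw [h3, pv_take2_sum, pvDeltas_getD p s i (by omega), pvDeltas_getD p s (i + 1) h]

-- flipping entries i and i+1 shifts the zip-sum by that delta
theorem pvZipSum_flip2 (i : Nat) (s p : List Int) (h : i + 1 < s.length) :
    pvZipSum p (pvFlip2 s i)
      = pvZipSum p s + pvIx p i * (1 - 2 * pvIx s i)
        + pvIx p (i + 1) * (1 - 2 * pvIx s (i + 1)) := by
  induction i generalizing s p with
  | zero =>
    match s, h with
    | a :: b :: t, _ =>
      match p with
      | [] => simp [pvZipSum, pvFlip2, pvIx]
      | [q] => simp [pvZipSum, pvFlip2, pvIx]; ring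
      | q :: r :: p' => simp [pvZipSum, pvFlip2, pvIx]; ring
  | succ i ih =>
    match s, h with
    | a :: t, h =>
      have ht : i + 1 < t.length := by simpa using h
      have hflip : pvFlip2 (a :: t) (i + 1) = a :: pvFlip2 t i := by
        simp [pvFlip2]
      cases p with
      | nil => simp [pvZipSum, hflip, pvIx]
      | cons b q =>
        have := ih t q ht
        simp [pvZipSum, hflip, pvIx] at this ⊢
        omega

-- the profit A's evaluate_solution returns, in B's totals form
def pvCur (p w s : List Int) (Q : Int) : Int :=
  if pvZipSum w s > Q then 0 else pvZipSum p s

theorem pvCur_eq (p w s : List Int) (Q : Int) :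
    (evaluate_solution s p w Q).1 = pvCur p w s Q := by
  simp [evaluate_solution, pvCur, apply_ite Prod.fst]

-- named copies of the two fold bodies (A's over neighbors, B's over indices in pvIx form)
def pvStepA (p w : List Int) (Q : Int) (st : List Int × Int) (neighbor : List Int) :
    List Int × Int :=
  let neighbor_profit := (evaluate_solution neighbor p w Q).1
  if neighbor_profit > st.2 then (neighbor, neighbor_profit) else st

def pvStepB (p w s : List Int) (Q : Int) (st : Option Nat × Int) (i : Nat) :
    Option Nat × Int :=
  let dp := pvIx p i * (1 - 2 * pvIx s i) + pvIx p (i + 1) * (1 - 2 * pvIx s (i + 1))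
  let dw := pvIx w i * (1 - 2 * pvIx s i) + pvIx w (i + 1) * (1 - 2 * pvIx s (i + 1))
  let np := if pvZipSum w s + dw > Q then 0 else pvZipSum p s + dp
  if np > st.2 then (some i, np) else st

-- the profit of neighbor i equals the delta formula
theorem pv_np_eq (p w s : List Int) (Q : Int) (i : Nat) (h : i + 1 < s.length) :
    (evaluate_solution (pvFlip2 s i) p w Q).1 =
      (if pvZipSum w s + (pvIx w i * (1 - 2 * pvIx s i)
            + pvIx w (i + 1) * (1 - 2 * pvIx s (i + 1))) > Q then 0
       else pvZipSum p s + (pvIx p i * (1 - 2 * pvIx s i)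
            + pvIx p (i + 1) * (1 - 2 * pvIx s (i + 1)))) := by
  have hp := pvZipSum_flip2 i s p h
  have hw := pvZipSum_flip2 i s w h
  simp only [evaluate_solution, apply_ite Prod.fst, hp, hw, gt_iff_lt, add_assoc]

-- invariant linking A's (best_solution, best_profit) fold with B's (best_i, best) fold
theorem pv_fold_rel (p w s : List Int) (Q : Int) :
    ∀ (l : List Nat), (∀ i ∈ l, i + 1 < s.length) →
    ∀ (a1 : List Int) (b1 : Option Nat) (c : Int),
    (b1 = none → a1 = s ∧ c = pvCur p w s Q) →
    (∀ j, b1 = some j → a1 = pvFlip2 s j ∧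
        c = (evaluate_solution (pvFlip2 s j) p w Q).1 ∧ c > pvCur p w s Q) →
    (let aR := (l.map (fun i => pvFlip2 s i)).foldl (pvStepA p w Q) (a1, c)
     let bR := l.foldl (pvStepB p w s Q) (b1, c)
     aR.2 = bR.2 ∧
     (bR.1 = none → aR.1 = s ∧ aR.2 = pvCur p w s Q) ∧
     (∀ j, bR.1 = some j → aR.1 = pvFlip2 s j ∧
        aR.2 = (evaluate_solution (pvFlip2 s j) p w Q).1 ∧ aR.2 > pvCur p w s Q)) := by
  intro l
  induction l with
  | nil =>
    intro _ a1 b1 c hn hs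
    refine ⟨rfl, fun hb => ?_, fun j hb => hs j hb⟩
    have := hn hb; exact ⟨this.1, this.2⟩
  | cons i l ih =>
    intro hl a1 b1 c hn hs
    have hi : i + 1 < s.length := hl i (by simp)
    have hnp := pv_np_eq p w s Q i hi
    have hge : pvCur p w s Q ≤ c := by
      cases hb : b1 with
      | none => exact le_of_eq (hn hb).2.symm
      | some j => exact le_of_lt (hs j hb).2.2
    have hl' : ∀ k ∈ l, k + 1 < s.length := fun k hk => hl k (by simp [hk])
    simp only [List.map_cons, List.foldl_cons]
    by_cases hc : (if pvZipSum w s + (pvIx w i * (1 - 2 * pvIx s i)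
          + pvIx w (i + 1) * (1 - 2 * pvIx s (i + 1))) > Q then 0
        else pvZipSum p s + (pvIx p i * (1 - 2 * pvIx s i)
          + pvIx p (i + 1) * (1 - 2 * pvIx s (i + 1)))) > c
    · have hA : pvStepA p w Q (a1, c) (pvFlip2 s i)
          = (pvFlip2 s i, (evaluate_solution (pvFlip2 s i) p w Q).1) := by
        simp only [pvStepA]
        rw [if_pos (by rw [hnp]; exact hc)]
      have hB : pvStepB p w s Q (b1, c) i
          = (some i, (evaluate_solution (pvFlip2 s i) p w Q).1) := by
        simp only [pvStepB]
        rw [if_pos hc, hnp]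
      rw [hA, hB]
      exact ih hl' (pvFlip2 s i) (some i) _
        (by intro h; cases h)
        (by intro j hj; cases hj; exact ⟨rfl, rfl, by rw [hnp]; exact lt_of_le_of_lt hge hc⟩)
    · have hA : pvStepA p w Q (a1, c) (pvFlip2 s i) = (a1, c) := by
        simp only [pvStepA]
        rw [if_neg (by rw [hnp]; exact hc)]
      have hB : pvStepB p w s Q (b1, c) i = (b1, c) := by
        simp only [pvStepB]
        rw [if_neg hc]
      rw [hA, hB]
      exact ih hl' a1 b1 c hn hs

theorem pv_loop_eq (p w : List Int) (Q : Int) :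
    ∀ (fuel : Nat) (s : List Int),
      pvLoopA fuel s p w Q (evaluate_solution s p w Q).1 = pvLoopB fuel s p w Q := by
  intro fuel
  induction fuel with
  | zero => intro s; rfl
  | succ fuel ih =>
    intro s
    have hmem : ∀ i ∈ List.range (s.length - 1), i + 1 < s.length := by
      intro i hi; simp only [List.mem_range] at hi; omega
    rw [pvCur_eq]
    simp only [pvLoopA, pvLoopB, get_neighbors]
    -- rewrite Source B's slice-sum fold body into its pvIx form (pvStepB)
    have hfold : ∀ (init : Option Nat × Int),
        (List.range (s.length - 1)).foldl
          (fun (st : Option Nat × Int) (i : Nat) =>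
            let dp := (PySem.List.slice (pvDeltas p s) (some (i : Int)) (some ((i : Int) + 2))).sum
            let dw := (PySem.List.slice (pvDeltas w s) (some (i : Int)) (some ((i : Int) + 2))).sum
            let np := if pvZipSum w s + dw > Q then 0 else pvZipSum p s + dp
            if np > st.2 then (some i, np) else st) init
        = (List.range (s.length - 1)).foldl (pvStepB p w s Q) init := by
      intro init
      refine PySem.List.foldl_congr_mem _ _ _ _ (fun acc x hx => ?_)
      have hxr := hmem x hx
      simp only [pvStepB, pv_dp_eq p s x hxr, pv_dp_eq w s x hxr]
    show (let st := ((List.range (s.length - 1)).map (fun i => pvFlip2 s i)).foldl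
            (pvStepA p w Q) (s, pvCur p w s Q)
          if st.2 > pvCur p w s Q then pvLoopA fuel st.1 p w Q st.2 else s)
        = (match ((List.range (s.length - 1)).foldl
              (fun (st : Option Nat × Int) (i : Nat) =>
                let dp := (PySem.List.slice (pvDeltas p s) (some (i : Int)) (some ((i : Int) + 2))).sum
                let dw := (PySem.List.slice (pvDeltas w s) (some (i : Int)) (some ((i : Int) + 2))).sum
                let np := if pvZipSum w s + dw > Q then 0 else pvZipSum p s + dp
                if np > st.2 then (some i, np) else st)
              (none, pvCur p w s Q)).1 with
           | none => s
           | some i => pvLoopB fuel (pvFlip2 s i) p w Q)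
    rw [hfold]
    obtain ⟨h2, hn, hs⟩ := pv_fold_rel p w s Q (List.range (s.length - 1)) hmem
      s none (pvCur p w s Q) (fun _ => ⟨rfl, rfl⟩) (fun j hj => by cases hj)
    simp only at h2 hn hs ⊢
    cases hb : ((List.range (s.length - 1)).foldl (pvStepB p w s Q)
        (none, pvCur p w s Q)).1 with
    | none =>
      obtain ⟨ha1, ha2⟩ := hn hb
      rw [ha2, if_neg (lt_irrefl _)]
    | some j =>
      obtain ⟨ha1, ha2, ha3⟩ := hs j hb
      rw [if_pos ha3, ha1, ha2]
      exact ih (pvFlip2 s j)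

-- ===== VERDICT =====
theorem hill_climbing_bi_spec : Claim_equal_hill_climbing_bi := by
  intro solution profits weights Q _
  unfold Spec_hill_climbing_bi hill_climbing_bi hill_climbing_bi_alt
  exact pv_loop_eq profits weights Q (2 ^ solution.length) solution
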